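-- pv_equiv track=rewrite | github.com/Flowers-of-Romance/ghost | Extract.py | segment_conversation
-- ===== SOURCE A (Python) =====
-- def segment_conversation(turns):
--     """
--     会話をトピック単位に分割する。
--     ユーザーの発言を起点に、その応答までを一つのセグメントにする。
--     """
--     segments = []
--     current = []
--
--     for turn in turns:
--         if turn["role"] == "user" and current:
--             segments.append(current)
--             current = []
--         current.append(turn)
--
--     if current:
--         segments.append(current)
--
--     return segments
-- ===== SOURCE B (Python) =====
-- def segment_conversation(turns):
--     """
--     会話をトピック単位に分割する。
--     ユーザーの発言を起点に、その応答までを一つのセグメントにする。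
--     """
--     segments = []
--     i = 0
--     n = len(turns)
--     while i < n:
--         j = i + 1
--         while j < n and turns[j]["role"] != "user":
--             j += 1
--         segments.append(turns[i:j])
--         i = j
--     return segments
-- ===== Notes on version B (the rewrite author's own statement) =====
-- stated objective: alternative
-- what changed: Replaces A's accumulate-and-flush pass (growing a current segment and flushing it at each later user turn and at the end) with a segment-at-a-time scan: from each segment start, advance an index over the following non-user run and slice the whole segment out in one step.
import Mathlib
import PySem

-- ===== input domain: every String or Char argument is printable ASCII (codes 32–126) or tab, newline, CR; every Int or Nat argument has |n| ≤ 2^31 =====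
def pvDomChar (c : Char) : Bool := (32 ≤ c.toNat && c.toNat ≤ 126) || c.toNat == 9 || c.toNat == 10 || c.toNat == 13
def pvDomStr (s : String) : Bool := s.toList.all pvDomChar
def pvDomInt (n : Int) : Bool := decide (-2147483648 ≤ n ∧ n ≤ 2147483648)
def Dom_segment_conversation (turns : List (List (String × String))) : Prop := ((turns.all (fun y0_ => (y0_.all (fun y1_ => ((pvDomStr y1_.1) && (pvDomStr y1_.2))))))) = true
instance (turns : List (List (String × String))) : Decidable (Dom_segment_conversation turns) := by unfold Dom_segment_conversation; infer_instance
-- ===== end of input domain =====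

-- B replaces A's accumulate-and-flush loop with a segment-at-a-time scan (start turn + non-user run, sliced out whole); same cost, different decomposition.

-- ===== PORT A =====
-- turn["role"] == "user" (first-match dict lookup; Pre_ guarantees the key exists)
def svIsUser (t : List (String × String)) : Bool :=
  (PySem.Dict.mk t).get? "role" == some "user"

-- one loop iteration over state (segments, current)
def svStepA (st : List (List (List (String × String))) × List (List (String × String)))
    (t : List (String × String)) :
    List (List (List (String × String))) × List (List (String × String)) :=
  if svIsUser t && !st.2.isEmpty then (st.1 ++ [st.2], [t]) else (st.1, st.2 ++ [t])

def segment_conversation (turns : List (List (String × String))) : List (List (List (String × String))) :=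
  let st := turns.foldl svStepA ([], [])
  if st.2.isEmpty then st.1 else st.1 ++ [st.2]

-- ===== PORT B =====
-- Source B's inner while advances j over the non-user run after the start i and slices turns[i:j];
-- on the suffix starting at i this is exactly takeWhile / dropWhile on the tail.
-- fuel = the remaining length: Source B's outer while terminates because i strictly advances
def svSegAlt (fuel : Nat) (turns : List (List (String × String))) : List (List (List (String × String))) :=
  match fuel, turns with
  | _, [] => []
  | 0, _ :: _ => []  -- unreachable: fuel ≥ length throughout
  | fuel + 1, t :: ts =>
      (t :: ts.takeWhile (fun u => !svIsUser u)) ::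
        svSegAlt fuel (ts.dropWhile (fun u => !svIsUser u))

def segment_conversation_alt (turns : List (List (String × String))) : List (List (List (String × String))) :=
  svSegAlt turns.length turns

-- ===== PRECONDITION & SPEC =====
-- Pre_ excludes exactly the inputs on which Python A raises KeyError: some turn has no "role" key.
def Pre_segment_conversation (turns : List (List (String × String))) : Prop :=
  ∀ t ∈ turns, ((PySem.Dict.mk t).get? "role").isSome
instance (turns : List (List (String × String))) : Decidable (Pre_segment_conversation turns) := by unfold Pre_segment_conversation; infer_instance

def pvWitness_segment_conversation : (List (List (String × String))) :=
  [[("role", "user"), ("content", "hi")], [("role", "assistant"), ("content", "yo")]]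

def Spec_segment_conversation (turns : List (List (String × String))) (out : List (List (List (String × String)))) : Prop := out = segment_conversation_alt turns
instance (turns : List (List (String × String))) (out : List (List (List (String × String)))) : Decidable (Spec_segment_conversation turns out) := by unfold Spec_segment_conversation; infer_instance

-- ===== CLAIM (what is proved, stated in full; the proofs are below) =====
def Claim_equal_segment_conversation : Prop := ∀ (turns : List (List (String × String))), Dom_segment_conversation turns → Pre_segment_conversation turns → Spec_segment_conversation turns (segment_conversation turns)

-- ===== LEMMAS AND PROOFS =====

-- fuel only needs to dominate the length
theorem svSegAlt_congr (f1 : Nat) (f2 : Nat) (ts : List (List (String × String)))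
    (h1 : ts.length ≤ f1) (h2 : ts.length ≤ f2) : svSegAlt f1 ts = svSegAlt f2 ts := by
  induction f1 generalizing f2 ts with
  | zero =>
      cases ts with
      | nil => cases f2 <;> rfl
      | cons t ts => simp at h1
  | succ f1 ih =>
      cases ts with
      | nil => cases f2 <;> rfl
      | cons t ts =>
          cases f2 with
          | zero => simp at h2
          | succ f2 =>
              simp only [svSegAlt, List.cons.injEq, true_and]
              exact ih f2 _
                (le_trans (List.length_dropWhile_le _ _) (Nat.le_of_succ_le_succ h1))
                (le_trans (List.length_dropWhile_le _ _) (Nat.le_of_succ_le_succ h2))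

theorem svAlt_cons (t : List (String × String)) (ts : List (List (String × String))) :
    segment_conversation_alt (t :: ts)
      = (t :: ts.takeWhile (fun u => !svIsUser u))
          :: segment_conversation_alt (ts.dropWhile (fun u => !svIsUser u)) := by
  unfold segment_conversation_alt
  simp only [List.length_cons, svSegAlt, List.cons.injEq, true_and]
  exact svSegAlt_congr _ _ _ (List.length_dropWhile_le _ _) le_rfl

-- A's flush step, applied to the final fold state
def svFlush (st : List (List (List (String × String))) × List (List (String × String))) :
    List (List (List (String × String))) :=
  if st.2.isEmpty then st.1 else st.1 ++ [st.2]

-- the finished-segments component only accumulates: it can be pulled out front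
theorem svFoldA_prepend (ts : List (List (String × String)))
    (segs : List (List (List (String × String)))) (cur : List (List (String × String))) :
    ts.foldl svStepA (segs, cur)
      = (segs ++ (ts.foldl svStepA ([], cur)).1, (ts.foldl svStepA ([], cur)).2) := by
  induction ts generalizing segs cur with
  | nil => simp
  | cons t ts ih =>
      simp only [List.foldl_cons, svStepA]
      by_cases h : (svIsUser t && !cur.isEmpty) = true
      · simp only [h, if_pos]
        simp only [List.nil_append]
        rw [ih (segs ++ [cur]) [t], ih [cur] [t]]
        simp
      · simp only [h, if_neg, Bool.not_eq_true]
        · exact ih segs (cur ++ [t])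

-- with a nonempty pending segment, A's remaining loop + flush is exactly B's span step
theorem svFoldA_span (ts : List (List (String × String))) (cur : List (List (String × String)))
    (hcur : cur ≠ []) :
    svFlush (ts.foldl svStepA ([], cur))
      = (cur ++ ts.takeWhile (fun u => !svIsUser u))
          :: segment_conversation_alt (ts.dropWhile (fun u => !svIsUser u)) := by
  induction ts generalizing cur with
  | nil =>
      simp [svFlush, hcur, segment_conversation_alt, svSegAlt]
  | cons t ts ih =>
      simp only [List.foldl_cons, svStepA, List.takeWhile_cons, List.dropWhile_cons]
      by_cases hu : svIsUser t = true
      · have hc : cur.isEmpty = false := by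
          cases cur <;> simp_all
        simp only [hu, hc, Bool.not_false, Bool.and_true, if_pos, Bool.not_true,
          Bool.false_eq_true, if_false]
        simp only [List.nil_append]
        rw [svFoldA_prepend ts [cur] [t], svAlt_cons]
        have := ih [t] (by simp)
        simp only [svFlush] at this ⊢
        by_cases he : (ts.foldl svStepA ([], [t])).2.isEmpty = true
        · simp only [he, if_pos] at this ⊢
          rw [this]; simp
        · simp only [he, if_neg, Bool.not_eq_true] at this ⊢
          · rw [List.append_assoc, this]; simp
      · simp only [Bool.not_eq_true] at hu
        simp only [hu, Bool.false_and, Bool.false_eq_true, if_false, Bool.not_false, if_true]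
        rw [ih (cur ++ [t]) (by simp)]
        simp

-- ===== VERDICT (by name: the statement is the Claim_ definition above) =====
theorem segment_conversation_spec : Claim_equal_segment_conversation := by
  intro turns _ _
  unfold Spec_segment_conversation
  cases turns with
  | nil => rfl
  | cons t ts =>
      show svFlush ((t :: ts).foldl svStepA ([], [])) = _
      simp only [List.foldl_cons, svStepA, List.isEmpty_nil, Bool.not_true, Bool.and_false,
        Bool.false_eq_true, if_false, List.nil_append]
      rw [svFoldA_span ts [t] (by simp), svAlt_cons]
      simp
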